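-- pv_equiv track=rewrite | github.com/udavdasha/pyCOGNAT | get_pyCOGNAT_database/udav_read_GenBank.py | get_gbk_sequence
-- ===== SOURCE A (Python) =====
-- def get_gbk_sequence(sequence, column_width = 10, column_num = 6):
--     begin_num = 1
--     i = 0
--     n = 0
--     result = list()
--     curr_string = ""
--     while i < len(sequence):
--         curr_part = sequence[i:i+column_width]
--         if n == 0: # First block in a string
--             begin_num = i + 1
--             prefix_spaces = 10 - len("%s" % begin_num) - 1
--             curr_string = "%s%s" % (prefix_spaces * " ", begin_num)
--         curr_string += " %s" % curr_part
--         n += 1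
--         if n >= column_num:
--             n = 0
--             result.append(curr_string)
--         i += column_width
--     if n != 0:
--         result.append(curr_string) #FIX: 2.18 (last string was omitted)
--     return "\n".join(result)
-- ===== SOURCE B (Python) =====
-- def get_gbk_sequence(sequence, column_width = 10, column_num = 6):
--     if not sequence:
--         return ""
--     per_line = max(column_num, 1)          # A treats any column_num < 1 as one block per line
--     step = column_width * per_line
--     lines = []
--     for start in range(0, len(sequence), step):
--         stop = min(start + step, len(sequence))
--         blocks = [sequence[j:j + column_width] for j in range(start, stop, column_width)]
--         lines.append(str(start + 1).rjust(9) + " " + " ".join(blocks))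
--     return "\n".join(lines)
-- ===== Notes on version B (the rewrite author's own statement) =====
-- stated objective: simpler
-- what changed: A's flat while loop threading a block counter, a growing current-line string and a post-loop fix-up for the last line is replaced by a nested decomposition: iterate directly over line start offsets, build each line from its slice blocks with rjust/join, and join the lines once.
import Mathlib
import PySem

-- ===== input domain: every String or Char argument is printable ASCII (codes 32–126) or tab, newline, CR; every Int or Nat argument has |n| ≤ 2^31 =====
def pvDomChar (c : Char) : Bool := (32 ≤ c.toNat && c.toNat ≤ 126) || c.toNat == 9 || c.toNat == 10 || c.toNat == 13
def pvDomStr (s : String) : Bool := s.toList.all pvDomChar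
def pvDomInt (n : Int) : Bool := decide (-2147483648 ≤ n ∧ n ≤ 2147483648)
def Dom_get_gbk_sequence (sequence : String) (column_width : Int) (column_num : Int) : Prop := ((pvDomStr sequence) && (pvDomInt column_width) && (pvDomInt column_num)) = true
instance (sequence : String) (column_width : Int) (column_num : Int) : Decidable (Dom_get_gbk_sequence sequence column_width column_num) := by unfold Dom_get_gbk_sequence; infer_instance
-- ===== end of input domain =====

-- B replaces A's flat counter-driven while loop by a nested decomposition (one pass per output
-- line, each line built from its blocks directly); objective: simpler, same O(n) cost.

-- ===== PORT A =====
-- A's while loop: state (i, n, result, curr_string); fuel = number of remaining iterations,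
-- bounded by the characters left (column_width ≥ 1 inside Pre_ makes sequence.length enough).
def gbkLoopA (s : List Char) (w c : Int) : Nat → Int → Int → List (List Char) → List Char →
    (List (List Char) × Int × List Char)
  | 0, _, n, result, cur => (result, n, cur)
  | fuel+1, i, n, result, cur =>
      if i < (s.length : Int) then
        -- curr_part = sequence[i:i+column_width]
        let part := PySem.Chars.slice s (some i) (some (i + w))
        -- if n == 0: curr_string = prefix_spaces*" " + str(begin_num), begin_num = i+1
        let cur1 := if n = 0 then
            PySem.List.pyRepeat [' '] (10 - ((PySem.Int.toChars (i+1)).length : Int) - 1)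
              ++ PySem.Int.toChars (i+1)
          else cur
        -- curr_string += " %s" % curr_part
        let cur2 := cur1 ++ ' ' :: part
        if n + 1 ≥ c then gbkLoopA s w c fuel (i+w) 0 (result ++ [cur2]) cur2
        else gbkLoopA s w c fuel (i+w) (n+1) result cur2
      else (result, n, cur)

def get_gbk_sequence (sequence : String) (column_width : Int) (column_num : Int) : String :=
  let s := sequence.toList
  let t := gbkLoopA s column_width column_num s.length 0 0 [] []
  -- if n != 0: result.append(curr_string)
  let result := if t.2.1 ≠ 0 then t.1 ++ [t.2.2] else t.1
  String.ofList (PySem.Chars.join ['\n'] result)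

-- ===== PORT B =====
-- one output line of Source B: str(start+1).rjust(9) + " " + " ".join(blocks)
-- (rjust(9) pads on the left up to width 9 and never truncates — exact: List.replicate on Nat
--  subtraction is empty when the number already has ≥ 9 digits, like Python's rjust)
def gbkLineB (s : List Char) (w step start : Int) : List Char :=
  let stop := min (start + step) ((s.length : Nat) : Int)
  let blocks := (PySem.List.pyRange start stop w).map
    (fun j => PySem.Chars.slice s (some j) (some (j + w)))
  let t := PySem.Int.toChars (start + 1)
  (List.replicate (9 - t.length) ' ' ++ t) ++ ' ' :: PySem.Chars.join [' '] blocks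

def get_gbk_sequence_alt (sequence : String) (column_width : Int) (column_num : Int) : String :=
  let s := sequence.toList
  if s.isEmpty then "" else
  let per := max column_num 1
  let step := column_width * per
  let lines := (PySem.List.pyRange 0 (s.length : Int) step).map (gbkLineB s column_width step)
  String.ofList (PySem.Chars.join ['\n'] lines)

-- ===== PRECONDITION & SPEC =====
-- A's while loop advances i by column_width: with a nonempty sequence and column_width ≤ 0 the
-- Python A never terminates (returns nothing), so exactly those inputs are excluded.
def Pre_get_gbk_sequence (sequence : String) (column_width : Int) (column_num : Int) : Prop :=
  sequence = "" ∨ 1 ≤ column_width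
instance (sequence : String) (column_width : Int) (column_num : Int) : Decidable (Pre_get_gbk_sequence sequence column_width column_num) := by unfold Pre_get_gbk_sequence; infer_instance
def pvWitness_get_gbk_sequence : String × Int × Int := ("MKAILVVLLYTFATANADTLC", 3, 2)
def Spec_get_gbk_sequence (sequence : String) (column_width : Int) (column_num : Int) (out : String) : Prop := out = get_gbk_sequence_alt sequence column_width column_num
instance (sequence : String) (column_width : Int) (column_num : Int) (out : String) : Decidable (Spec_get_gbk_sequence sequence column_width column_num out) := by unfold Spec_get_gbk_sequence; infer_instance

-- ===== CLAIM (what is proved, stated in full; the proofs are below) =====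
def Claim_equal_get_gbk_sequence : Prop := ∀ (sequence : String) (column_width : Int) (column_num : Int), Dom_get_gbk_sequence sequence column_width column_num → Pre_get_gbk_sequence sequence column_width column_num → Spec_get_gbk_sequence sequence column_width column_num (get_gbk_sequence sequence column_width column_num)

-- ===== LEMMAS AND PROOFS =====

-- pyRange with a positive step, structural forms
theorem pyRange_pos_nil (a b s : Int) (hs : 0 < s) (hba : b ≤ a) :
    PySem.List.pyRange a b s = [] := by
  rw [PySem.List.pyRange_of_pos a b hs]
  simp [show ¬ a < b by omega]

theorem pyRange_pos_cons (a b s : Int) (hs : 0 < s) (hab : a < b) :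
    PySem.List.pyRange a b s = a :: PySem.List.pyRange (a + s) b s := by
  rw [PySem.List.pyRange_of_pos a b hs, PySem.List.pyRange_of_pos (a+s) b hs]
  have h1 : b - a + s - 1 = (b - a - 1) + 1 * s := by ring
  have h2 : (b - a + s - 1) / s = (b - a - 1) / s + 1 := by
    rw [h1, Int.add_mul_ediv_right _ _ (by omega : s ≠ 0)]
  have h3 : 0 ≤ (b - a - 1) / s := Int.ediv_nonneg (by omega) (by omega)
  have h4 : ((b - a + s - 1) / s).toNat = ((b - a - 1) / s).toNat + 1 := by omega
  by_cases h : a + s < b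
  · have h5 : b - (a + s) + s - 1 = b - a - 1 := by ring
    simp only [if_pos hab, if_pos h, h5, h4, List.range_succ_eq_map]
    simp only [List.map_cons, List.map_map, Int.natCast_zero]
    congr 1
    · simp
    · apply List.map_congr_left; intro k _
      simp only [Function.comp, Nat.succ_eq_add_one]
      push_cast; ring
  · have h5 : (b - a - 1) / s = 0 := Int.ediv_eq_zero_of_lt (by omega) (by omega)
    simp only [if_pos hab, if_neg h, h5] at h4 ⊢
    norm_num [h4]

-- the integer length of the character list
def lenI (s : List Char) : Int := ((s.length : Nat) : Int)

-- one block: sequence[j:j+w]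
def blockOf (s : List Char) (w j : Int) : List Char :=
  PySem.Chars.slice s (some j) (some (j + w))

-- the blocks a line starting at i still takes: at most r of them, stopping at the end of s
def blocksUpTo (s : List Char) (w i r : Int) : List (List Char) :=
  (PySem.List.pyRange i (min (i + w * r) (lenI s)) w).map (blockOf s w)

-- A's line prefix for the line whose first character index is i
def prefixOf (i : Int) : List Char :=
  PySem.List.pyRepeat [' '] (10 - ((PySem.Int.toChars (i+1)).length : Int) - 1)
    ++ PySem.Int.toChars (i+1)

-- reference form of one finished line
def lineRef (s : List Char) (w cn i : Int) : List Char :=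
  prefixOf i ++ ((blocksUpTo s w i cn).map (fun b => ' ' :: b)).flatten

-- reference form of all lines from a given start index
def linesFrom (s : List Char) (w cn start : Int) : List (List Char) :=
  (PySem.List.pyRange start (lenI s) (w * cn)).map (lineRef s w cn)

-- the post-loop 'if n != 0: result.append(curr_string)'
def finalizeA : (List (List Char) × Int × List Char) → List (List Char)
  | (res, n, cur) => if n ≠ 0 then res ++ [cur] else res

theorem blocksUpTo_nil (s : List Char) (w i r : Int) (hw : 0 < w) (hi : lenI s ≤ i) :
    blocksUpTo s w i r = [] := by
  unfold blocksUpTo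
  rw [pyRange_pos_nil _ _ _ hw (by omega : min (i + w * r) (lenI s) ≤ i)]
  rfl

theorem blocksUpTo_cons (s : List Char) (w i r : Int) (hw : 0 < w) (hr : 1 ≤ r)
    (hi : i < lenI s) :
    blocksUpTo s w i r = blockOf s w i :: blocksUpTo s w (i + w) (r - 1) := by
  unfold blocksUpTo
  have h1 : i < min (i + w * r) (lenI s) := by
    have : 0 < w * r := by positivity
    omega
  rw [pyRange_pos_cons _ _ _ hw h1]
  have h2 : i + w + w * (r - 1) = i + w * r := by ring
  simp [h2]

-- A's loop ignores column_num below 1: with n ≥ 0 the test n+1 >= column_num is the test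
-- n+1 >= max column_num 1
theorem gbkLoopA_max (s : List Char) (w c : Int) :
    ∀ (fuel : Nat) (i n : Int) (res : List (List Char)) (cur : List Char), 0 ≤ n →
    gbkLoopA s w c fuel i n res cur = gbkLoopA s w (max c 1) fuel i n res cur := by
  intro fuel
  induction fuel with
  | zero => intro i n res cur _; rfl
  | succ fuel ih =>
    intro i n res cur hn
    simp only [gbkLoopA]
    by_cases hi : i < (s.length : Int)
    · simp only [if_pos hi]
      by_cases hc : n + 1 ≥ c
      · rw [if_pos hc, if_pos (by omega : n + 1 ≥ max c 1), ih _ _ _ _ le_rfl]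
      · rw [if_neg hc, if_neg (by omega : ¬ n + 1 ≥ max c 1), ih _ _ _ _ (by omega)]
    · simp only [if_neg hi]

-- the loop after its guard fails (also the fuel-exhaustion case i ≥ len)
theorem finalize_base (s : List Char) (w cn i n : Int) (res : List (List Char))
    (cur : List Char) (hw : 1 ≤ w) (hcn : 1 ≤ cn) (hi : lenI s ≤ i) (hn0 : 0 ≤ n)
    (hnc : n ≤ cn) :
    (n = 0 → finalizeA (res, n, cur) = res ++ linesFrom s w cn i) ∧
    (1 ≤ n → finalizeA (res, n, cur)
      = res ++ (cur ++ ((blocksUpTo s w i (cn - n)).map (fun b => ' ' :: b)).flatten)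
          :: linesFrom s w cn (i + w * (cn - n))) := by
  constructor
  · intro hn; subst hn
    unfold linesFrom
    rw [pyRange_pos_nil _ _ _ (by positivity) (by omega)]
    simp [finalizeA]
  · intro hn
    have hwr : 0 ≤ w * (cn - n) := mul_nonneg (by omega) (by omega)
    unfold linesFrom
    rw [pyRange_pos_nil _ _ _ (by positivity) (by omega)]
    rw [blocksUpTo_nil s w i _ (by omega) hi]
    simp [finalizeA, show n ≠ 0 by omega]

theorem gbkLoopA_step (s : List Char) (w cn : Int) (fuel : Nat) (i n : Int)
    (res : List (List Char)) (cur : List Char) :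
    gbkLoopA s w cn (fuel+1) i n res cur =
      if i < (s.length : Int) then
        (if n + 1 ≥ cn then
          gbkLoopA s w cn fuel (i+w) 0
            (res ++ [(if n = 0 then prefixOf i else cur) ++ ' ' :: blockOf s w i])
            ((if n = 0 then prefixOf i else cur) ++ ' ' :: blockOf s w i)
        else
          gbkLoopA s w cn fuel (i+w) (n+1) res
            ((if n = 0 then prefixOf i else cur) ++ ' ' :: blockOf s w i))
      else (res, n, cur) := rfl

theorem linesFrom_cons (s : List Char) (w cn start : Int) (hw : 1 ≤ w) (hcn : 1 ≤ cn)
    (hlt : start < lenI s) :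
    linesFrom s w cn start = lineRef s w cn start :: linesFrom s w cn (start + w * cn) := by
  unfold linesFrom
  rw [pyRange_pos_cons _ _ _ (by positivity) hlt]
  simp

theorem blocksUpTo_zero (s : List Char) (w i : Int) (hw : 1 ≤ w) :
    blocksUpTo s w i 0 = [] := by
  unfold blocksUpTo
  rw [pyRange_pos_nil _ _ _ (by omega) (by simp)]
  rfl

-- main loop invariant: from a fresh-line state (n = 0) the loop produces exactly the reference
-- lines from i; from mid-line state (1 ≤ n < cn) it finishes the current line then continues
theorem gbkLoopA_spec (s : List Char) (w cn : Int) (hw : 1 ≤ w) (hcn : 1 ≤ cn) :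
    ∀ (fuel : Nat) (i n : Int) (res : List (List Char)) (cur : List Char),
    0 ≤ i → lenI s - i ≤ (fuel : Int) →
    (finalizeA (gbkLoopA s w cn fuel i 0 res cur) = res ++ linesFrom s w cn i) ∧
    (1 ≤ n → n < cn → finalizeA (gbkLoopA s w cn fuel i n res cur)
      = res ++ (cur ++ ((blocksUpTo s w i (cn - n)).map (fun b => ' ' :: b)).flatten)
          :: linesFrom s w cn (i + w * (cn - n))) := by
  intro fuel
  induction fuel with
  | zero =>
    intro i n res cur hi hfuel
    have hlen : lenI s ≤ i := by simpa using hfuel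
    constructor
    · exact (finalize_base s w cn i 0 res cur hw hcn hlen le_rfl (by omega)).1 rfl
    · intro h1 h2
      exact (finalize_base s w cn i n res cur hw hcn hlen (by omega) (by omega)).2 h1
  | succ fuel ih =>
    intro i n res cur hi hfuel
    by_cases hilt : i < (s.length : Int)
    · have hlen : lenI s - (i + w) ≤ (fuel : Int) := by
        unfold lenI at *; push_cast at hfuel ⊢; omega
      have hi' : 0 ≤ i + w := by omega
      have hltI : i < lenI s := by unfold lenI; omega
      constructor
      · -- n = 0 : start a new line
        rw [gbkLoopA_step, if_pos hilt]
        rw [if_pos rfl]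
        rw [linesFrom_cons s w cn i hw hcn hltI]
        rw [show lineRef s w cn i
              = prefixOf i ++ ((blocksUpTo s w i cn).map (fun b => ' ' :: b)).flatten from rfl]
        rw [blocksUpTo_cons s w i cn (by omega) hcn hltI]
        by_cases hc : (0:Int) + 1 ≥ cn
        · have hcn1 : cn = 1 := by omega
          rw [if_pos hc]
          rw [(ih (i+w) 0 _ _ hi' hlen).1]
          subst hcn1
          rw [show (1:Int) - 1 = 0 by ring, blocksUpTo_zero s w (i+w) hw]
          simp
        · rw [if_neg hc]
          have h2 := (ih (i+w) (0+1) res (prefixOf i ++ ' ' :: blockOf s w i) hi' hlen).2 (by omega) (by omega)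
          rw [h2]
          have e1 : cn - (0+1) = cn - 1 := by ring
          have e2 : i + w + w * (cn - 1) = i + w * cn := by ring
          rw [e1, e2]
          simp
      · intro h1 h2
        rw [gbkLoopA_step, if_pos hilt]
        rw [if_neg (by omega : ¬ n = 0)]
        rw [blocksUpTo_cons s w i (cn - n) (by omega) (by omega) hltI]
        by_cases hc : n + 1 ≥ cn
        · have hcn1 : cn - n = 1 := by omega
          rw [if_pos hc]
          rw [(ih (i+w) 0 _ _ hi' hlen).1]
          rw [hcn1]
          rw [show (1:Int) - 1 = 0 by ring, blocksUpTo_zero s w (i+w) hw]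
          simp
        · rw [if_neg hc]
          have hrec := (ih (i+w) (n+1) res (cur ++ ' ' :: blockOf s w i) hi' hlen).2 (by omega) (by omega)
          rw [hrec]
          rw [show cn - (n+1) = cn - n - 1 by ring,
              show i + w + w * (cn - n - 1) = i + w * (cn - n) by ring]
          simp
    · have hlen : lenI s ≤ i := by unfold lenI; omega
      constructor
      · simp only [gbkLoopA, if_neg hilt]
        exact (finalize_base s w cn i 0 res cur hw hcn hlen le_rfl (by omega)).1 rfl
      · intro h1 h2
        simp only [gbkLoopA, if_neg hilt]
        exact (finalize_base s w cn i n res cur hw hcn hlen (by omega) (by omega)).2 h1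

-- ' ' :: " ".join(blocks)  =  concatenation of " "+block, for a nonempty block list
theorem join_space_eq_flatten (bs : List (List Char)) (hbs : bs ≠ []) :
    ' ' :: PySem.Chars.join [' '] bs = (bs.map (fun b => ' ' :: b)).flatten := by
  induction bs with
  | nil => simp at hbs
  | cons x rest ih =>
    cases rest with
    | nil => simp [PySem.Chars.join_singleton]
    | cons y t =>
      rw [PySem.Chars.join_cons_cons]
      simp only [List.map_cons, List.flatten_cons]
      have h := ih (by simp)
      simp only [List.map_cons, List.flatten_cons] at h
      rw [← h]
      simp

-- each Source B line equals the reference line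
theorem gbkLineB_eq (s : List Char) (w cn start : Int) (hw : 1 ≤ w) (hcn : 1 ≤ cn)
    (h0 : 0 ≤ start) (hlt : start < lenI s) :
    gbkLineB s w (w * cn) start = lineRef s w cn start := by
  unfold gbkLineB lineRef prefixOf blocksUpTo blockOf
  have hbk : PySem.List.pyRange start (min (start + w * cn) (lenI s)) w ≠ [] := by
    rw [pyRange_pos_cons _ _ _ (by omega) (by
      have : 0 < w * cn := by positivity
      unfold lenI at *; omega)]
    simp
  rw [PySem.List.pyRepeat_singleton]
  rw [← join_space_eq_flatten _ (by simpa using hbk)]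
  have e9 : (10 - ((PySem.Int.toChars (start+1)).length : Int) - 1).toNat
      = 9 - (PySem.Int.toChars (start+1)).length := by omega
  rw [e9]
  simp [lenI]

theorem finalizeA_eq (t : List (List Char) × Int × List Char) :
    (if t.2.1 ≠ 0 then t.1 ++ [t.2.2] else t.1) = finalizeA t := by
  obtain ⟨res, n, cur⟩ := t
  rfl

theorem get_gbk_sequence_spec : Claim_equal_get_gbk_sequence := by
  unfold Claim_equal_get_gbk_sequence
  intro seq w c _hdom hpre
  unfold Spec_get_gbk_sequence get_gbk_sequence get_gbk_sequence_alt
  dsimp only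
  by_cases hs : seq.toList = []
  · rw [hs]
    rfl
  · have hw : 1 ≤ w := by
      rcases hpre with h | h
      · exact absurd (by rw [h]; rfl) hs
      · exact h
    rw [if_neg (by simp [hs] : ¬ seq.toList.isEmpty = true)]
    rw [finalizeA_eq]
    rw [gbkLoopA_max seq.toList w c seq.toList.length 0 0 [] [] le_rfl]
    have hcn : 1 ≤ max c 1 := le_max_right c 1
    have hA := (gbkLoopA_spec seq.toList w (max c 1) hw hcn seq.toList.length 0 0 [] []
      le_rfl (by unfold lenI; omega)).1
    rw [hA]
    have hB : (PySem.List.pyRange 0 (seq.toList.length : Int) (w * max c 1)).map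
        (gbkLineB seq.toList w (w * max c 1))
        = linesFrom seq.toList w (max c 1) 0 := by
      unfold linesFrom lenI
      apply List.map_congr_left
      intro x hx
      rw [PySem.List.mem_pyRange_iff_of_pos (by positivity)] at hx
      exact gbkLineB_eq seq.toList w (max c 1) x hw hcn hx.1 (by unfold lenI; omega)
    rw [hB]
    simp
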